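-- pv_equiv track=rewrite | github.com/zhaobod1/huo15-skills | huo15-img-prompt/scripts/safety_lint.py | _build_advice
-- ===== SOURCE A (Python) =====
-- from typing import Dict, List, Tuple
--
-- PLATFORM_STRICTNESS = {
--     "dalle": "max",      # 最严
--     "DALL-E": "max",
--     "midjourney": "high", # 中等
--     "MJ": "high",
--     "mj": "high",
--     "sd": "low",         # 宽松（本地）
--     "SD": "low",
--     "sdxl": "low",
--     "flux": "low",
--     "comfyui": "low",
-- }
--
-- def _build_advice(platform: str, subs: List[Dict]) -> str:
--     if not subs:
--         return f"无风险词，可直接喂给 {platform}。"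
--     lines = [f"针对 {platform}（严格度: {PLATFORM_STRICTNESS.get(platform, 'high')}）的合规建议："]
--     high = [s for s in subs if s["risk_for_platform"] == "high"]
--     if high:
--         lines.append(f"  🔴 {len(high)} 个高风险词建议必换：" + ", ".join(s["word"] for s in high))
--     med = [s for s in subs if s["risk_for_platform"] == "medium"]
--     if med:
--         lines.append(f"  🟡 {len(med)} 个中风险词建议软化：" + ", ".join(s["word"] for s in med))
--     return "\n".join(lines)
-- ===== SOURCE B (Python) =====
-- from typing import Dict, List
--
-- PLATFORM_STRICTNESS = {
--     "dalle": "max",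
--     "DALL-E": "max",
--     "midjourney": "high",
--     "MJ": "high",
--     "mj": "high",
--     "sd": "low",
--     "SD": "low",
--     "sdxl": "low",
--     "flux": "low",
--     "comfyui": "low",
-- }
--
-- def _build_advice(platform: str, subs: List[Dict]) -> str:
--     if not subs:
--         return f"无风险词，可直接喂给 {platform}。"
--     # one right-to-left pass; no intermediate word lists: the joined strings are
--     # built directly, prepending "w, " in front of what follows
--     hc, hs, mc, ms = 0, "", 0, ""
--     for s in reversed(subs):
--         r = s["risk_for_platform"]
--         if r == "high":
--             w = s["word"]
--             hc, hs = hc + 1, w if hc == 0 else w + ", " + hs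
--         elif r == "medium":
--             w = s["word"]
--             mc, ms = mc + 1, w if mc == 0 else w + ", " + ms
--     out = f"针对 {platform}（严格度: {PLATFORM_STRICTNESS.get(platform, 'high')}）的合规建议："
--     if hc:
--         out += f"\n  🔴 {hc} 个高风险词建议必换：{hs}"
--     if mc:
--         out += f"\n  🟡 {mc} 个中风险词建议软化：{ms}"
--     return out
-- ===== Notes on version B (the rewrite author's own statement) =====
-- stated objective: alternative
-- what changed: B replaces A's two filter passes, per-bucket word lists and line-list '\n'.join with a single right-to-left pass that maintains (count, already-joined string) accumulators per risk level and builds the result by direct string concatenation, so no intermediate lists exist at all.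
import Mathlib
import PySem

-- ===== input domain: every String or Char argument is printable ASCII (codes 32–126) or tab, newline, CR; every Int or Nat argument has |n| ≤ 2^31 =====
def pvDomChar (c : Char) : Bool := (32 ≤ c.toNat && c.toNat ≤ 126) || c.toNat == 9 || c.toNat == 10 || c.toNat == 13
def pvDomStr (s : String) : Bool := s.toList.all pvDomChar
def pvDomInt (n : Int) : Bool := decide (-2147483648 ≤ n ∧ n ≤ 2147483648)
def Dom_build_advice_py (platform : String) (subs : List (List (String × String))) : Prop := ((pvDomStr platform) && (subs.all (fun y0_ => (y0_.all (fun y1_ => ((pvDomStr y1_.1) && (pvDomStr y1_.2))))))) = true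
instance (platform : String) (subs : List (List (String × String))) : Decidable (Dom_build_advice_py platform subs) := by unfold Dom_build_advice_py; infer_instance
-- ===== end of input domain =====

-- B: one right-to-left pass keeping (count, already-joined string) per risk level and
-- direct string concatenation, instead of A's two filter passes + word lists + '\n'.join.

-- shared helpers: dict access s[k] (first-match lookup; Pre_ excludes the KeyError cases, so
-- the "" default is never observed) and the module-level PLATFORM_STRICTNESS.get(platform,'high')
def pvKeyGet (s : List (String × String)) (k : String) : String :=
  (List.lookup k s).getD ""

def pvStrictness (platform : String) : String :=
  ((PySem.Dict.ofList [("dalle","max"),("DALL-E","max"),("midjourney","high"),("MJ","high"),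
    ("mj","high"),("sd","low"),("SD","low"),("sdxl","low"),("flux","low"),
    ("comfyui","low")]).get? platform).getD "high"

-- ===== PORT A =====
def build_advice_py (platform : String) (subs : List (List (String × String))) : String :=
  if subs.isEmpty then "无风险词，可直接喂给 " ++ platform ++ "。"
  else
    let lines : List String :=
      ["针对 " ++ platform ++ "（严格度: " ++ pvStrictness platform ++ "）的合规建议："]
    let high := subs.filter (fun s => pvKeyGet s "risk_for_platform" == "high")
    let lines := if !high.isEmpty then
        lines ++ ["  🔴 " ++ PySem.Int.toStr (high.length : Int) ++ " 个高风险词建议必换：" ++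
          PySem.Str.join ", " (high.map (fun s => pvKeyGet s "word"))]
      else lines
    let med := subs.filter (fun s => pvKeyGet s "risk_for_platform" == "medium")
    let lines := if !med.isEmpty then
        lines ++ ["  🟡 " ++ PySem.Int.toStr (med.length : Int) ++ " 个中风险词建议软化：" ++
          PySem.Str.join ", " (med.map (fun s => pvKeyGet s "word"))]
      else lines
    PySem.Str.join "\n" lines

-- ===== PORT B =====
-- 'for s in reversed(subs)' updating the 4-tuple = a right fold over subs
def pvStep (s : List (String × String)) (acc : Nat × String × Nat × String) :
    Nat × String × Nat × String :=
  let (hc, hs, mc, ms) := acc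
  let r := pvKeyGet s "risk_for_platform"
  if r == "high" then
    let w := pvKeyGet s "word"
    (hc + 1, (if hc == 0 then w else w ++ ", " ++ hs), mc, ms)
  else if r == "medium" then
    let w := pvKeyGet s "word"
    (hc, hs, mc + 1, (if mc == 0 then w else w ++ ", " ++ ms))
  else (hc, hs, mc, ms)

def build_advice_py_alt (platform : String) (subs : List (List (String × String))) : String :=
  if subs.isEmpty then "无风险词，可直接喂给 " ++ platform ++ "。"
  else
    let (hc, hs, mc, ms) := subs.foldr pvStep (0, "", 0, "")
    let out := "针对 " ++ platform ++ "（严格度: " ++ pvStrictness platform ++ "）的合规建议："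
    let out := if hc ≠ 0 then
        out ++ "\n  🔴 " ++ PySem.Int.toStr (hc : Int) ++ " 个高风险词建议必换：" ++ hs
      else out
    let out := if mc ≠ 0 then
        out ++ "\n  🟡 " ++ PySem.Int.toStr (mc : Int) ++ " 个中风险词建议软化：" ++ ms
      else out
    out

-- ===== PRECONDITION & SPEC =====
-- Pre_ excludes exactly the inputs where Python A raises KeyError: a sub dict without
-- "risk_for_platform", or a high/medium sub dict without "word".
def Pre_build_advice_py (platform : String) (subs : List (List (String × String))) : Prop :=
  ∀ s ∈ subs, (List.lookup "risk_for_platform" s).isSome = true ∧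
    ((List.lookup "risk_for_platform" s = some "high" ∨
      List.lookup "risk_for_platform" s = some "medium") →
      (List.lookup "word" s).isSome = true)
instance (platform : String) (subs : List (List (String × String))) : Decidable (Pre_build_advice_py platform subs) := by unfold Pre_build_advice_py; infer_instance

def pvWitness_build_advice_py : String × (List (List (String × String))) :=
  ("dalle", [[("risk_for_platform","high"),("word","nude")],
             [("risk_for_platform","low"),("word","ok")]])

def Spec_build_advice_py (platform : String) (subs : List (List (String × String))) (out : String) : Prop := out = build_advice_py_alt platform subs
instance (platform : String) (subs : List (List (String × String))) (out : String) : Decidable (Spec_build_advice_py platform subs out) := by unfold Spec_build_advice_py; infer_instance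

-- ===== CLAIM =====
def Claim_equal_build_advice_py : Prop := ∀ (platform : String) (subs : List (List (String × String))), Dom_build_advice_py platform subs → Pre_build_advice_py platform subs → Spec_build_advice_py platform subs (build_advice_py platform subs)

-- ===== LEMMAS AND PROOFS =====

theorem join_two (sep a b : String) :
    PySem.Str.join sep [a, b] = a ++ sep ++ b := by
  apply String.toList_injective
  simp [PySem.Str.join, PySem.Chars.join, List.intercalate]

theorem join_one (sep a : String) : PySem.Str.join sep [a] = a := by
  apply String.toList_injective
  simp [PySem.Str.join, PySem.Chars.join, List.intercalate]

theorem join_cons_cons (sep a b : String) (l : List String) :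
    PySem.Str.join sep (a :: b :: l) = a ++ sep ++ PySem.Str.join sep (b :: l) := by
  apply String.toList_injective
  simp [PySem.Str.join, PySem.Chars.join, List.intercalate]

theorem join_three (sep a b c : String) :
    PySem.Str.join sep [a, b, c] = a ++ sep ++ b ++ sep ++ c := by
  rw [join_cons_cons, join_two]
  simp [String.append_assoc]

-- B's right fold computes exactly A's bucket lengths and joined bucket word lists.
theorem pvFoldr_step (subs : List (List (String × String))) :
    subs.foldr pvStep (0, "", 0, "")
    = ((subs.filter (fun s => pvKeyGet s "risk_for_platform" == "high")).length,
       PySem.Str.join ", " ((subs.filter (fun s => pvKeyGet s "risk_for_platform" == "high")).map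
          (fun s => pvKeyGet s "word")),
       (subs.filter (fun s => pvKeyGet s "risk_for_platform" == "medium")).length,
       PySem.Str.join ", " ((subs.filter (fun s => pvKeyGet s "risk_for_platform" == "medium")).map
          (fun s => pvKeyGet s "word"))) := by
  induction subs with
  | nil => simp [PySem.Str.join, PySem.Chars.join, List.intercalate]
  | cons s rest ih =>
    rw [List.foldr_cons, ih]
    by_cases hh : pvKeyGet s "risk_for_platform" = "high"
    · simp only [pvStep, hh, List.filter_cons, beq_iff_eq, reduceIte]
      cases hrest : rest.filter (fun t => pvKeyGet t "risk_for_platform" == "high") with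
      | nil => simp [join_one]
      | cons a l => simp [join_cons_cons]
    · by_cases hm : pvKeyGet s "risk_for_platform" = "medium"
      · simp only [pvStep, hm, List.filter_cons, beq_iff_eq, reduceIte]
        cases hrest : rest.filter (fun t => pvKeyGet t "risk_for_platform" == "medium") with
        | nil => simp [join_one]
        | cons a l => simp [join_cons_cons]
      · simp [pvStep, hh, hm]

theorem build_advice_eq (platform : String) (subs : List (List (String × String))) :
    build_advice_py platform subs = build_advice_py_alt platform subs := by
  unfold build_advice_py build_advice_py_alt
  by_cases he : subs.isEmpty
  · simp [he]
  · simp only [he, Bool.false_eq_true, ite_false]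
    rw [pvFoldr_step]
    cases hH : subs.filter (fun s => pvKeyGet s "risk_for_platform" == "high") with
    | nil =>
      cases hM : subs.filter (fun s => pvKeyGet s "risk_for_platform" == "medium") with
      | nil => simp [join_one]
      | cons b m =>
        simp [join_two]
        apply String.toList_injective; simp
    | cons a l =>
      cases hM : subs.filter (fun s => pvKeyGet s "risk_for_platform" == "medium") with
      | nil =>
        simp [join_two]
        apply String.toList_injective; simp
      | cons b m =>
        simp [join_three]
        apply String.toList_injective; simp

-- ===== VERDICT =====
theorem build_advice_py_spec : Claim_equal_build_advice_py := by
  intro platform subs _ _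
  exact build_advice_eq platform subs
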